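-- pv_equiv track=rewrite | github.com/mpi-advance/locality_aware | benchmark_tests/tuolumne/plot_errorbars_spx_tpx_cpx.py | find_max_size_in_all_li_times
-- ===== SOURCE A (Python) =====
-- def find_max_size_in_all_li_times(li_times):
--     def extract_sizes(times):
--         all_sizes = None
--         for subdict in times.values():
--             for inner_list in subdict.values():
--                 current = {pair[0] for pair in inner_list}
--                 if all_sizes is None:
--                     all_sizes = current
--                 else:
--                     all_sizes = all_sizes.intersection(current)
--         return all_sizes if all_sizes is not None else set()
--
--     common_sizes = None
--     for times in li_times:
--         sizes = extract_sizes(times)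
--         if common_sizes is None:
--             common_sizes = sizes
--         else:
--             common_sizes = common_sizes.intersection(sizes)
--
--     return max(common_sizes) if common_sizes else None
-- ===== SOURCE B (Python) =====
-- def find_max_size_in_all_li_times(li_times):
--     # Frequency-table approach: count, for each size, how many inner lists of a
--     # `times` contain it (a size is common to that times iff its count equals the
--     # number of inner lists), then how many `times` have it; a size is globally
--     # common iff its global count equals len(li_times).
--     total = len(li_times)
--     global_count = {}
--     for times in li_times:
--         local_count = {}
--         n = 0
--         for subdict in times.values():
--             for inner_list in subdict.values():
--                 n += 1
--                 for size in {pair[0] for pair in inner_list}: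
--                     local_count[size] = local_count.get(size, 0) + 1
--         for size, c in local_count.items():
--             if c == n:
--                 global_count[size] = global_count.get(size, 0) + 1
--     common = [size for size, c in global_count.items() if c == total]
--     return max(common) if common else None
-- ===== Notes on version B (the rewrite author's own statement) =====
-- stated objective: alternative
-- what changed: Replaces A's incremental set intersections (per-times over inner lists, then across li_times) with frequency tables: a local counter per times thresholded at the number of inner lists, and a global counter thresholded at len(li_times); max of the sizes that pass both thresholds.
import Mathlib
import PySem

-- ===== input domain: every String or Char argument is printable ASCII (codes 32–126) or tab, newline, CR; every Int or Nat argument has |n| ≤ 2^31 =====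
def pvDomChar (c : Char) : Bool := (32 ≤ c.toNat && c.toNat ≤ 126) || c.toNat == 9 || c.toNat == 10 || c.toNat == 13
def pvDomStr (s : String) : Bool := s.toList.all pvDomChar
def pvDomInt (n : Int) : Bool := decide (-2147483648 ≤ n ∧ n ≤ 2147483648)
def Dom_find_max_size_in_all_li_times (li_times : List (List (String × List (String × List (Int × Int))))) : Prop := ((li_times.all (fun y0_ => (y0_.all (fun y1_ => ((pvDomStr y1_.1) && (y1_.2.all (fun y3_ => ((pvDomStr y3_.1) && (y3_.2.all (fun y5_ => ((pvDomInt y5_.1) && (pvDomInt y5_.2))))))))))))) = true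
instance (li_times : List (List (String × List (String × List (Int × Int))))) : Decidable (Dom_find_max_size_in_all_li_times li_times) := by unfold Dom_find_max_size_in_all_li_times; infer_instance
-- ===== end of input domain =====

-- B replaces A's incremental set intersections with two frequency tables (per-times and global)
-- thresholded at the number of inner lists resp. len(li_times); same result, similar cost ("alternative").

-- ===== PORT A =====
def pvExtractSizes (times : List (String × List (String × List (Int × Int)))) : Option (PySem.Set Int) :=
  (PySem.Dict.values (PySem.Dict.ofList times)).foldl
    (fun all_sizes subdict =>
      (PySem.Dict.values (PySem.Dict.ofList subdict)).foldl
        (fun all_sizes inner_list =>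
          let current : PySem.Set Int := PySem.Set.ofList (inner_list.map (fun pair => pair.1))
          match all_sizes with
          | none => some current
          | some s => some (PySem.Set.inter s current))
        all_sizes)
    none

def find_max_size_in_all_li_times (li_times : List (List (String × List (String × List (Int × Int))))) : Option Int :=
  let common_sizes : Option (PySem.Set Int) := li_times.foldl
    (fun common_sizes times =>
      let sizes : PySem.Set Int := match pvExtractSizes times with
        | some s => s
        | none => PySem.Set.empty
      match common_sizes with
      | none => some sizes
      | some c => some (PySem.Set.inter c sizes))
    none
  match common_sizes with
  | none => none
  | some s => if s.isEmpty then none else PySem.List.max? s (fun x => x)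

-- ===== PORT B =====
def find_max_size_in_all_li_times_alt (li_times : List (List (String × List (String × List (Int × Int))))) : Option Int :=
  let total : Int := (li_times.length : Int)
  let global_count : PySem.Dict Int Int := li_times.foldl
    (fun global_count times =>
      let st : PySem.Dict Int Int × Int :=
        (PySem.Dict.values (PySem.Dict.ofList times)).foldl
          (fun st subdict =>
            (PySem.Dict.values (PySem.Dict.ofList subdict)).foldl
              (fun st inner_list =>
                let n := st.2 + 1
                let lc := (PySem.Set.ofList (inner_list.map (fun pair => pair.1))).foldl
                  (fun lc size => lc.insert size (lc.getD size 0 + 1)) st.1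
                (lc, n))
              st)
          (PySem.Dict.empty, 0)
      st.1.items.foldl
        (fun gc p => if p.2 == st.2 then gc.insert p.1 (gc.getD p.1 0 + 1) else gc)
        global_count)
    PySem.Dict.empty
  let common : List Int := (global_count.items.filter (fun p => p.2 == total)).map (fun p => p.1)
  if common.isEmpty then none else PySem.List.max? common (fun x => x)

-- ===== PRECONDITION & SPEC =====
def Spec_find_max_size_in_all_li_times (li_times : List (List (String × List (String × List (Int × Int))))) (out : Option Int) : Prop := out = find_max_size_in_all_li_times_alt li_times
instance (li_times : List (List (String × List (String × List (Int × Int))))) (out : Option Int) : Decidable (Spec_find_max_size_in_all_li_times li_times out) := by unfold Spec_find_max_size_in_all_li_times; infer_instance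

-- ===== CLAIM (what is proved, stated in full; the proofs are below) =====
def Claim_equal_find_max_size_in_all_li_times : Prop := ∀ (li_times : List (List (String × List (String × List (Int × Int))))), Dom_find_max_size_in_all_li_times li_times → Spec_find_max_size_in_all_li_times li_times (find_max_size_in_all_li_times li_times)

-- ===== LEMMAS AND PROOFS =====

-- proof-side abbreviations
def pvS (inner_list : List (Int × Int)) : PySem.Set Int :=
  PySem.Set.ofList (inner_list.map (fun pair => pair.1))

def pvV (times : List (String × List (String × List (Int × Int)))) : List (List (Int × Int)) :=
  (PySem.Dict.values (PySem.Dict.ofList times)).flatMap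
    (fun subdict => PySem.Dict.values (PySem.Dict.ofList subdict))

def pvE (times : List (String × List (String × List (Int × Int)))) : PySem.Set Int :=
  match pvExtractSizes times with
  | some s => s
  | none => PySem.Set.empty

def pvX (times : List (String × List (String × List (Int × Int)))) : List Int :=
  (pvV times).flatMap pvS

def pvCt (times : List (String × List (String × List (Int × Int)))) : List Int :=
  (PySem.Set.ofList (pvX times)).filter
    (fun k => ((List.count k (pvX times) : Int) == ((pvV times).length : Int)))

-- flattening of a nested foldl
theorem pv_foldl_nest {α β γ : Type} (l : List α) (g : α → List β) (f : γ → β → γ) (init : γ) :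
    l.foldl (fun acc a => (g a).foldl f acc) init = (l.flatMap g).foldl f init := by
  induction l generalizing init with
  | nil => rfl
  | cons a t ih => simp [List.flatMap_cons, List.foldl_append, ih]

-- A's option-accumulator intersection fold, once it is some
theorem pv_interFold_some {α : Type} (g : α → PySem.Set Int) (L : List α) (s0 : PySem.Set Int) :
    L.foldl (fun acc a => match acc with
      | none => some (g a)
      | some s => some (PySem.Set.inter s (g a))) (some s0)
    = some (L.foldl (fun s a => PySem.Set.inter s (g a)) s0) := by
  induction L generalizing s0 with
  | nil => rfl
  | cons a t ih => simp [List.foldl_cons, ih]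

theorem pv_mem_interFold {α : Type} (g : α → PySem.Set Int) (L : List α) (s0 : PySem.Set Int) (x : Int) :
    x ∈ L.foldl (fun s a => PySem.Set.inter s (g a)) s0 ↔ x ∈ s0 ∧ ∀ a ∈ L, x ∈ g a := by
  induction L generalizing s0 with
  | nil => simp
  | cons a t ih =>
    simp only [List.foldl_cons, ih, PySem.Set.mem_inter, List.mem_cons]
    constructor
    · rintro ⟨⟨h1, h2⟩, h3⟩
      exact ⟨h1, fun b hb => hb.elim (fun h => h ▸ h2) (h3 b)⟩
    · rintro ⟨h1, h2⟩
      exact ⟨⟨h1, h2 a (Or.inl rfl)⟩, fun b hb => h2 b (Or.inr hb)⟩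

theorem pv_extract_eq (times : List (String × List (String × List (Int × Int)))) :
    pvExtractSizes times = match pvV times with
      | [] => none
      | il :: rest => some (rest.foldl (fun s il' => PySem.Set.inter s (pvS il')) (pvS il)) := by
  unfold pvExtractSizes pvV
  rw [pv_foldl_nest]
  cases h : (PySem.Dict.values (PySem.Dict.ofList times)).flatMap
      (fun subdict => PySem.Dict.values (PySem.Dict.ofList subdict)) with
  | nil => rfl
  | cons il rest =>
    simp only [List.foldl_cons]
    exact pv_interFold_some pvS rest (pvS il)

theorem pv_mem_pvE (times : List (String × List (String × List (Int × Int)))) (x : Int) :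
    x ∈ pvE times ↔ pvV times ≠ [] ∧ ∀ il ∈ pvV times, x ∈ pvS il := by
  unfold pvE
  rw [pv_extract_eq]
  cases h : pvV times with
  | nil => simp [PySem.Set.empty]
  | cons il rest =>
    show x ∈ List.foldl (fun s il' => PySem.Set.inter s (pvS il')) (pvS il) rest ↔ _
    rw [pv_mem_interFold]
    constructor
    · rintro ⟨h1, h2⟩
      refine ⟨by simp, fun l hl => ?_⟩
      rcases List.mem_cons.mp hl with hl | hl
      · exact hl ▸ h1
      · exact h2 l hl
    · rintro ⟨-, h2⟩
      exact ⟨h2 il List.mem_cons_self, fun l hl => h2 l (List.mem_cons_of_mem il hl)⟩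

theorem pv_count_flatMap {α : Type} (L : List α) (g : α → List Int)
    (hnd : ∀ a ∈ L, (g a).Nodup) (x : Int) :
    (L.flatMap g).count x = L.countP (fun a => decide (x ∈ g a)) := by
  induction L with
  | nil => simp
  | cons a t ih =>
    simp only [List.flatMap_cons, List.count_append, List.countP_cons]
    rw [ih (fun b hb => hnd b (List.mem_cons_of_mem a hb))]
    by_cases hx : x ∈ g a
    · rw [List.count_eq_one_of_mem (hnd a (List.mem_cons_self)) hx]
      simp [hx]; omega
    · rw [List.count_eq_zero_of_not_mem hx]
      simp [hx]

-- B's per-times pair fold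
theorem pv_pair_fold (L : List (List (Int × Int))) (d : PySem.Dict Int Int) (n : Int) :
    L.foldl (fun st il =>
        ((PySem.Set.ofList (il.map (fun pair => pair.1))).foldl
            (fun lc size => lc.insert size (lc.getD size 0 + 1)) st.1,
          st.2 + 1)) (d, n)
    = ((L.flatMap pvS).foldl (fun lc size => lc.insert size (lc.getD size 0 + 1)) d, n + L.length) := by
  induction L generalizing d n with
  | nil => simp
  | cons il t ih =>
    simp only [List.foldl_cons, List.flatMap_cons, List.foldl_append, ih, pvS]
    refine Prod.ext rfl ?_
    simp only [List.length_cons]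
    push_cast
    ring

def pvY (li_times : List (List (String × List (String × List (Int × Int))))) : List Int :=
  li_times.flatMap pvCt

def pvCommon (li_times : List (List (String × List (String × List (Int × Int))))) : List Int :=
  (PySem.Set.ofList (pvY li_times)).filter
    (fun k => ((List.count k (pvY li_times) : Int) == (li_times.length : Int)))

theorem pv_nodup_Ct (times : List (String × List (String × List (Int × Int)))) :
    (pvCt times).Nodup :=
  List.Nodup.filter _ (PySem.Set.nodup_ofList _)

theorem pv_mem_Ct (times : List (String × List (String × List (Int × Int)))) (x : Int) :
    x ∈ pvCt times ↔ x ∈ pvE times := by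
  rw [pv_mem_pvE]
  unfold pvCt
  rw [List.mem_filter]
  simp only [PySem.Set.mem_ofList, beq_iff_eq, Int.natCast_inj]
  rw [show pvX times = (pvV times).flatMap pvS from rfl, List.mem_flatMap,
    pv_count_flatMap (pvV times) pvS (fun a _ => PySem.Set.nodup_ofList _) x]
  constructor
  · rintro ⟨⟨il, hil, hx⟩, hcnt⟩
    refine ⟨by rintro h; rw [h] at hil; exact absurd hil (List.not_mem_nil), ?_⟩
    intro il' hil'
    have := List.countP_eq_length.mp hcnt il' hil'
    simpa using this
  · rintro ⟨hne, hall⟩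
    obtain ⟨il0, hil0⟩ := List.exists_mem_of_ne_nil _ hne
    refine ⟨⟨il0, hil0, hall il0 hil0⟩, List.countP_eq_length.mpr ?_⟩
    intro il' hil'
    simpa using hall il' hil'

theorem pv_mem_common (li_times : List (List (String × List (String × List (Int × Int)))))
    (hli : li_times ≠ []) (x : Int) :
    x ∈ pvCommon li_times ↔ ∀ t ∈ li_times, x ∈ pvE t := by
  unfold pvCommon
  rw [List.mem_filter]
  simp only [PySem.Set.mem_ofList, beq_iff_eq, Int.natCast_inj]
  rw [show pvY li_times = li_times.flatMap pvCt from rfl, List.mem_flatMap,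
    pv_count_flatMap li_times pvCt (fun a _ => pv_nodup_Ct a) x]
  constructor
  · rintro ⟨-, hcnt⟩
    intro t ht
    have := List.countP_eq_length.mp hcnt t ht
    exact (pv_mem_Ct t x).mp (by simpa using this)
  · intro hall
    obtain ⟨t0, ht0⟩ := List.exists_mem_of_ne_nil _ hli
    refine ⟨⟨t0, ht0, (pv_mem_Ct t0 x).mpr (hall t0 ht0)⟩, List.countP_eq_length.mpr ?_⟩
    intro t ht
    simpa using (pv_mem_Ct t x).mpr (hall t ht)

-- B's port computes max over pvCommon
theorem pv_alt_eq (li_times : List (List (String × List (String × List (Int × Int))))) :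
    find_max_size_in_all_li_times_alt li_times =
      if (pvCommon li_times).isEmpty then none
      else PySem.List.max? (pvCommon li_times) (fun x => x) := by
  unfold find_max_size_in_all_li_times_alt
  have hstep :
      (fun (global_count : PySem.Dict Int Int) (times : List (String × List (String × List (Int × Int)))) =>
        let st : PySem.Dict Int Int × Int :=
          (PySem.Dict.values (PySem.Dict.ofList times)).foldl
            (fun st subdict =>
              (PySem.Dict.values (PySem.Dict.ofList subdict)).foldl
                (fun st inner_list =>
                  let n := st.2 + 1
                  let lc := (PySem.Set.ofList (inner_list.map (fun pair => pair.1))).foldl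
                    (fun lc size => lc.insert size (lc.getD size 0 + 1)) st.1
                  (lc, n))
                st)
            (PySem.Dict.empty, 0)
        st.1.items.foldl
          (fun gc p => if p.2 == st.2 then gc.insert p.1 (gc.getD p.1 0 + 1) else gc)
          global_count)
      = fun (global_count : PySem.Dict Int Int) times =>
          (pvCt times).foldl (fun gc s => gc.insert s (gc.getD s 0 + 1)) global_count := by
    funext gc t
    simp only [pv_foldl_nest]
    rw [show ((PySem.Dict.values (PySem.Dict.ofList t)).flatMap
          (fun subdict => PySem.Dict.values (PySem.Dict.ofList subdict))) = pvV t from rfl]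
    rw [pv_pair_fold (pvV t) PySem.Dict.empty 0]
    simp only [zero_add]
    rw [show (pvV t).flatMap pvS = pvX t from rfl]
    rw [PySem.Dict.foldl_insert_getD_add_one_eq_counter, PySem.Dict.items_counter]
    rw [List.foldl_map, PySem.List.foldl_if_eq_foldl_filter]
    rfl
  rw [hstep, pv_foldl_nest (g := pvCt)]
  rw [show li_times.flatMap pvCt = pvY li_times from rfl]
  rw [PySem.Dict.foldl_insert_getD_add_one_eq_counter]
  simp only [PySem.Dict.items_counter, List.filter_map, List.map_map, Function.comp_def,
    List.map_id']
  rfl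

-- A's port computes max over an intersection fold
theorem pv_A_eq (t : List (String × List (String × List (Int × Int))))
    (rest : List (List (String × List (String × List (Int × Int))))) :
    find_max_size_in_all_li_times (t :: rest) =
      (let C := rest.foldl (fun s t' => PySem.Set.inter s (pvE t')) (pvE t)
       if C.isEmpty then none else PySem.List.max? C (fun x => x)) := by
  unfold find_max_size_in_all_li_times
  have hstep :
      (fun (common_sizes : Option (PySem.Set Int)) (times : List (String × List (String × List (Int × Int)))) =>
        let sizes : PySem.Set Int := match pvExtractSizes times with
          | some s => s
          | none => PySem.Set.empty
        match common_sizes with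
        | none => some sizes
        | some c => some (PySem.Set.inter c sizes))
      = fun common_sizes times =>
          match common_sizes with
          | none => some (pvE times)
          | some c => some (PySem.Set.inter c (pvE times)) := rfl
  rw [hstep, List.foldl_cons]
  rw [show (match (none : Option (PySem.Set Int)) with
      | none => some (pvE t)
      | some c => some (PySem.Set.inter c (pvE t))) = some (pvE t) from rfl]
  rw [pv_interFold_some pvE rest (pvE t)]

-- ===== VERDICT (by name: the statement is the Claim_ definition above) =====
theorem find_max_size_in_all_li_times_spec : Claim_equal_find_max_size_in_all_li_times := by
  intro li_times _
  unfold Spec_find_max_size_in_all_li_times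
  cases li_times with
  | nil => rfl
  | cons t rest =>
    rw [pv_A_eq, pv_alt_eq]
    simp only []
    set C := rest.foldl (fun s t' => PySem.Set.inter s (pvE t')) (pvE t) with hCdef
    set Bc := pvCommon (t :: rest) with hBdef
    have hC : ∀ x, x ∈ C ↔ ∀ t' ∈ (t :: rest), x ∈ pvE t' := by
      intro x
      rw [hCdef, pv_mem_interFold]
      constructor
      · rintro ⟨h1, h2⟩ t' ht'
        rcases List.mem_cons.mp ht' with h | h
        · exact h ▸ h1
        · exact h2 t' h
      · intro h
        exact ⟨h t List.mem_cons_self, fun t' ht' => h t' (List.mem_cons_of_mem t ht')⟩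
    have hB : ∀ x, x ∈ Bc ↔ ∀ t' ∈ (t :: rest), x ∈ pvE t' := fun x =>
      pv_mem_common (t :: rest) (List.cons_ne_nil t rest) x
    have hmem : ∀ x, x ∈ C ↔ x ∈ Bc := fun x => (hC x).trans (hB x).symm
    have hnil : C = [] ↔ Bc = [] := by
      simp only [List.eq_nil_iff_forall_not_mem]
      exact ⟨fun h a ha => h a ((hmem a).mpr ha), fun h a ha => h a ((hmem a).mp ha)⟩
    by_cases h : C = []
    · rw [if_pos (List.isEmpty_iff.mpr h), if_pos (List.isEmpty_iff.mpr (hnil.mp h))]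
    · have h2 : Bc ≠ [] := fun hb => h (hnil.mpr hb)
      rw [if_neg (fun hh => h (List.isEmpty_iff.mp hh)),
        if_neg (fun hh => h2 (List.isEmpty_iff.mp hh))]
      obtain ⟨a, ha⟩ : ∃ a, PySem.List.max? C (fun x => x) = some a := by
        cases hm : PySem.List.max? C (fun x => x) with
        | none => exact absurd ((PySem.List.max?_eq_none_iff _ _).mp hm) h
        | some a => exact ⟨a, rfl⟩
      obtain ⟨b, hb⟩ : ∃ b, PySem.List.max? Bc (fun x => x) = some b := by
        cases hm : PySem.List.max? Bc (fun x => x) with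
        | none => exact absurd ((PySem.List.max?_eq_none_iff _ _).mp hm) h2
        | some b => exact ⟨b, rfl⟩
      rw [ha, hb]
      have haC : a ∈ C := PySem.List.max?_mem ha
      have hbB : b ∈ Bc := PySem.List.max?_mem hb
      have h1 : a ≤ b := PySem.List.max?_isMax hb a ((hmem a).mp haC)
      have h2' : b ≤ a := PySem.List.max?_isMax ha b ((hmem b).mpr hbB)
      rw [le_antisymm h1 h2']
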